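-- pv_equiv track=rewrite | github.com/zju3dv/BoxDreamer | scripts/tools/latex_helper.py | generate_ascii_table
-- ===== SOURCE A (Python) =====
-- def generate_ascii_table(rows, fields):
--     """
--     Generate an ASCII table preview based on the table data.
--     This is useful for a quick visual inspection of the output.
--
--     Args:
--         rows (list): List of dictionaries representing table rows.
--         fields (list): List of field names (column headers).
--
--     Returns:
--         A string containing the ASCII table.
--     """
--     # Build a 2D list (header + rows).
--     table_data = [fields]
--     for row in rows:
--         row_line = [row.get(field, "") for field in fields]
--         table_data.append(row_line)
--
--     # Compute the maximum width for each column.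
--     col_widths = []
--     for col_idx in range(len(fields)):
--         max_width = max(len(str(row[col_idx])) for row in table_data)
--         col_widths.append(max_width)
--     horizontal_line = "+" + "+".join("-" * (w + 2) for w in col_widths) + "+"
--
--     lines = [horizontal_line]
--     # Build header row.
--     header_cells = []
--     for i, cell in enumerate(table_data[0]):
--         header_cells.append(" " + str(cell).ljust(col_widths[i]) + " ")
--     lines.append("|" + "|".join(header_cells) + "|")
--     lines.append(horizontal_line)
--     # Build body rows.
--     for row in table_data[1:]:
--         row_cells = []
--         for i, cell in enumerate(row):
--             row_cells.append(" " + str(cell).ljust(col_widths[i]) + " ")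
--         lines.append("|" + "|".join(row_cells) + "|")
--     lines.append(horizontal_line)
--     return "\n".join(lines)
-- ===== SOURCE B (Python) =====
-- def generate_ascii_table(rows, fields):
--     """Single-pass variant: column widths are accumulated while the rows are
--     read, and one helper renders header and body rows uniformly."""
--     widths = [len(str(f)) for f in fields]
--     body = []
--     for row in rows:
--         cells = [str(row.get(f, "")) for f in fields]
--         body.append(cells)
--         widths = [max(w, len(c)) for w, c in zip(widths, cells)]
--
--     hline = "+" + "+".join("-" * (w + 2) for w in widths) + "+"
--
--     def render(cells):
--         return "|" + "|".join(" " + c.ljust(w) + " " for c, w in zip(cells, widths)) + "|"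
--
--     lines = [hline, render([str(f) for f in fields]), hline]
--     lines.extend(render(cells) for cells in body)
--     lines.append(hline)
--     return "\n".join(lines)
-- ===== Notes on version B (the rewrite author's own statement) =====
-- stated objective: simpler
-- what changed: B replaces A's two-phase approach (materialize a header+rows table, then re-scan every column with indexed max()/enumerate and duplicated header/body formatting) by a single accumulating pass that zips running column widths with each row's cells, plus one uniform render helper for header and body lines.
import Mathlib
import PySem

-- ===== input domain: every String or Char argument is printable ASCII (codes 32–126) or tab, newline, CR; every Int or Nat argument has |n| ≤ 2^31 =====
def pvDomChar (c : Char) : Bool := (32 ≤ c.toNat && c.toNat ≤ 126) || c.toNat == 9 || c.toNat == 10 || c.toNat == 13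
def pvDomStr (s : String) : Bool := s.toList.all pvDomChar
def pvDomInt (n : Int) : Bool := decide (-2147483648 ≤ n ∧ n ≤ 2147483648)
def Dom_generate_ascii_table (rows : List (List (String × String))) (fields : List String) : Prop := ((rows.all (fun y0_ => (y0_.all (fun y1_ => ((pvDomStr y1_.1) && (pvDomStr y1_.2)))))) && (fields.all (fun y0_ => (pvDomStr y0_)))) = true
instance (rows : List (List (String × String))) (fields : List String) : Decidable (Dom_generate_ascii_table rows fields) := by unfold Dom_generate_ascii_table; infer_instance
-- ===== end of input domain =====

-- B fuses A's two passes (build the whole table, then scan every column for its width) into one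
-- accumulating pass over the rows, and renders header and body lines with one uniform helper;
-- objective: simpler, same output on every input.

-- str.ljust for a char list (PySem has no ljust); used by both ports, as both Pythons call str.ljust
def pyLjust (cs : List Char) (w : Nat) : List Char := cs ++ List.replicate (w - cs.length) ' '

-- [row.get(field, "") for field in fields] — this comprehension appears verbatim in both Pythons
def cellsOf (fields : List String) (row : List (String × String)) : List String :=
  fields.map (fun f => PySem.Dict.getD ⟨row⟩ f "")

-- ===== PORT A =====
def generate_ascii_table (rows : List (List (String × String))) (fields : List String) : String :=
  let tableData : List (List String) := fields :: rows.map (cellsOf fields)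
  let colWidths : List Nat :=
    (PySem.List.pyRange 0 fields.length 1).map (fun i =>
      (PySem.List.max? (tableData.map (fun r => (PySem.List.pyGetD r i "").toList.length))
        (fun x => x)).getD 0)
  let horizontal : List Char :=
    '+' :: PySem.Chars.join ['+'] (colWidths.map (fun w => List.replicate (w + 2) '-')) ++ ['+']
  let headerCells : List (List Char) :=
    (PySem.List.enumerate (PySem.List.pyGetD tableData 0 [])).map (fun p =>
      ' ' :: pyLjust p.2.toList (PySem.List.pyGetD colWidths p.1 0) ++ [' '])
  let headerLine : List Char := '|' :: PySem.Chars.join ['|'] headerCells ++ ['|']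
  let bodyLines : List (List Char) :=
    (PySem.List.slice tableData (some 1) none).map (fun row =>
      '|' :: PySem.Chars.join ['|'] ((PySem.List.enumerate row).map (fun p =>
        ' ' :: pyLjust p.2.toList (PySem.List.pyGetD colWidths p.1 0) ++ [' '])) ++ ['|'])
  String.ofList (PySem.Chars.join ['\n']
    ([horizontal, headerLine, horizontal] ++ bodyLines ++ [horizontal]))

-- ===== PORT B =====
def altRender (widths : List Nat) (cells : List String) : List Char :=
  '|' :: PySem.Chars.join ['|']
    ((cells.zip widths).map (fun p => ' ' :: pyLjust p.1.toList p.2 ++ [' '])) ++ ['|']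

def generate_ascii_table_alt (rows : List (List (String × String))) (fields : List String) : String :=
  let acc :=
    rows.foldl (fun (st : List Nat × List (List String)) row =>
        ((st.1.zip (cellsOf fields row)).map (fun p => max p.1 p.2.toList.length),
         st.2 ++ [cellsOf fields row]))
      (fields.map (fun f => f.toList.length), [])
  let widths := acc.1
  let body := acc.2
  let hline : List Char :=
    '+' :: PySem.Chars.join ['+'] (widths.map (fun w => List.replicate (w + 2) '-')) ++ ['+']
  String.ofList (PySem.Chars.join ['\n']
    ([hline, altRender widths fields, hline] ++ body.map (altRender widths) ++ [hline]))

-- ===== PRECONDITION & SPEC =====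
def Spec_generate_ascii_table (rows : List (List (String × String))) (fields : List String) (out : String) : Prop := out = generate_ascii_table_alt rows fields
instance (rows : List (List (String × String))) (fields : List String) (out : String) : Decidable (Spec_generate_ascii_table rows fields out) := by unfold Spec_generate_ascii_table; infer_instance

-- ===== CLAIM (what is proved, stated in full; the proofs are below) =====
def Claim_equal_generate_ascii_table : Prop := ∀ (rows : List (List (String × String))) (fields : List String), Dom_generate_ascii_table rows fields → Spec_generate_ascii_table rows fields (generate_ascii_table rows fields)

-- ===== LEMMAS AND PROOFS =====

theorem max?_cons_nat (x : Nat) (xs : List Nat) :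
    PySem.List.max? (x :: xs) (fun a => a) = some (xs.foldl max x) := by
  show List.foldl _ (some x) xs = _
  induction xs generalizing x with
  | nil => rfl
  | cons a t ih =>
    simp only [List.foldl_cons]
    have : (if x < a then some a else some x) = some (max x a) := by
      rcases Nat.lt_or_ge x a with h | h
      · simp [h, Nat.max_eq_right (Nat.le_of_lt h)]
      · simp [Nat.not_lt.mpr h, Nat.max_eq_left h]
    rw [this, ih]

theorem map_range_getD (n : Nat) (hd : List Nat) (hh : hd.length = n) :
    (List.range n).map (fun i => hd.getD i 0) = hd := by
  apply List.ext_getElem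
  · simp [hh]
  · intro i h1 h2
    simp only [List.getElem_map, List.getElem_range]
    rw [List.getD_eq_getElem _ _ h2]

theorem colfold (n : Nat) (tl : List (List Nat)) (hd : List Nat) (hh : hd.length = n)
    (ht : ∀ r ∈ tl, r.length = n) :
    (List.range n).map (fun i => tl.foldl (fun m r => max m (r.getD i 0)) (hd.getD i 0))
      = tl.foldl (fun ws r => (ws.zip r).map (fun p => max p.1 p.2)) hd := by
  induction tl generalizing hd with
  | nil => simpa using map_range_getD n hd hh
  | cons r t ih =>
    have hr : r.length = n := ht r (by simp)
    have hlen : ((hd.zip r).map (fun p : Nat × Nat => max p.1 p.2)).length = n := by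
      simp [hh, hr]
    simp only [List.foldl_cons]
    rw [← ih _ hlen (fun r hr => ht r (by simp [hr]))]
    apply List.map_congr_left
    intro i hi
    have hi' : i < n := List.mem_range.mp hi
    congr 1
    rw [List.getD_eq_getElem _ _ (by omega : i < ((hd.zip r).map (fun p : Nat × Nat => max p.1 p.2)).length),
        List.getElem_map, List.getElem_zip,
        List.getD_eq_getElem _ _ (by omega : i < hd.length),
        List.getD_eq_getElem _ _ (by omega : i < r.length)]

theorem getD_len (r : List String) (k : Nat) :
    (PySem.List.pyGetD r (k : Int) "").toList.length
      = (r.map (fun s => s.toList.length)).getD k 0 := by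
  rw [PySem.List.pyGetD_natCast]
  by_cases h : k < r.length
  · rw [List.getD_eq_getElem _ _ h, List.getD_eq_getElem _ _ (by simpa using h), List.getElem_map]
  · rw [List.getD_eq_default _ _ (by omega), List.getD_eq_default _ _ (by simpa using h)]
    rfl

theorem widths_eq (rows : List (List (String × String))) (fields : List String) :
    (PySem.List.pyRange 0 fields.length 1).map (fun i =>
      (PySem.List.max? (((fields :: rows.map (cellsOf fields)).map
          (fun r => (PySem.List.pyGetD r i "").toList.length))) (fun x => x)).getD 0)
    = rows.foldl (fun ws row =>
        ((ws.zip (cellsOf fields row)).map (fun p => max p.1 p.2.toList.length)))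
      (fields.map (fun f => f.toList.length)) := by
  have hfg : ∀ (ws : List Nat) (cells : List String),
      (ws.zip cells).map (fun p => max p.1 p.2.toList.length)
      = (ws.zip (cells.map (fun s => s.toList.length))).map (fun p => max p.1 p.2) := by
    intro ws cells
    apply List.ext_getElem
    · simp
    · intro i h1 h2
      have hw : i < ws.length := by simp at h1; omega
      have hc : i < cells.length := by simp at h1; omega
      simp [List.getElem_zip]
  rw [show (fun ws row =>
        ((ws.zip (cellsOf fields row)).map (fun p => max p.1 p.2.toList.length)))
      = (fun ws row =>
        ((ws.zip ((cellsOf fields row).map (fun s => s.toList.length))).map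
          (fun p => max p.1 p.2))) from funext fun ws => funext fun row => hfg ws _,
    ← List.foldl_map (f := fun row => ((cellsOf fields row).map (fun s => s.toList.length)))
      (g := fun (ws r : List Nat) => (ws.zip r).map (fun p => max p.1 p.2)),
    ← colfold fields.length (rows.map (fun row =>
        (cellsOf fields row).map (fun s => s.toList.length)))
      (fields.map (fun f => f.toList.length)) (by simp) ?hlen]
  case hlen =>
    intro r hr
    simp only [List.mem_map] at hr
    obtain ⟨row, _, rfl⟩ := hr
    simp [cellsOf]
  rw [PySem.List.pyRange_zero_nat, List.map_map]
  apply List.map_congr_left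
  intro k _
  simp only [Function.comp_apply, List.map_cons, max?_cons_nat, Option.getD_some,
    List.foldl_map, getD_len]

theorem render_eq (widths : List Nat) (cells : List String) (h : cells.length = widths.length) :
    (PySem.List.enumerate cells).map (fun p =>
        ' ' :: pyLjust p.2.toList (PySem.List.pyGetD widths p.1 0) ++ [' '])
      = (cells.zip widths).map (fun p => ' ' :: pyLjust p.1.toList p.2 ++ [' ']) := by
  apply List.ext_getElem
  · simp [PySem.List.length_enumerate, h]
  · intro i h1 h2
    have hc : i < cells.length := by simpa [PySem.List.length_enumerate] using h1
    simp only [List.getElem_map, PySem.List.getElem_enumerate, List.getElem_zip, zero_add,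
      PySem.List.pyGetD_natCast, List.getD_eq_getElem _ _ (h ▸ hc)]

theorem body_eq (W : List Nat) (rcs : List (List String))
    (h : ∀ r ∈ rcs, r.length = W.length) :
    rcs.map (fun row => '|' :: PySem.Chars.join ['|'] ((PySem.List.enumerate row).map (fun p =>
        ' ' :: pyLjust p.2.toList (PySem.List.pyGetD W p.1 0) ++ [' '])) ++ ['|'])
    = rcs.map (fun row => '|' :: PySem.Chars.join ['|'] ((row.zip W).map (fun p =>
        ' ' :: pyLjust p.1.toList p.2 ++ [' '])) ++ ['|']) := by
  apply List.map_congr_left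
  intro r hr
  rw [render_eq _ _ (h r hr)]

theorem main_eq (rows : List (List (String × String))) (fields : List String) :
    generate_ascii_table rows fields = generate_ascii_table_alt rows fields := by
  simp only [generate_ascii_table, generate_ascii_table_alt, altRender]
  have hsplit : rows.foldl (fun (st : List Nat × List (List String)) row =>
        ((st.1.zip (cellsOf fields row)).map (fun p => max p.1 p.2.toList.length),
         st.2 ++ [cellsOf fields row]))
      (fields.map (fun f => f.toList.length), [])
      = (rows.foldl (fun ws row =>
            (ws.zip (cellsOf fields row)).map (fun p => max p.1 p.2.toList.length))
          (fields.map (fun f => f.toList.length)),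
         rows.foldl (fun b row => b ++ [cellsOf fields row]) []) :=
    PySem.List.foldl_prod_mk
      (fun ws row => (ws.zip (cellsOf fields row)).map (fun p => max p.1 p.2.toList.length))
      (fun b row => b ++ [cellsOf fields row]) rows (fields.map (fun f => f.toList.length)) []
  rw [hsplit]
  simp only [PySem.List.foldl_append_singleton_eq_map, List.nil_append]
  rw [← widths_eq rows fields]
  have hWlen : ((PySem.List.pyRange 0 fields.length 1).map (fun i =>
      (PySem.List.max? (((fields :: rows.map (cellsOf fields)).map
          (fun r => (PySem.List.pyGetD r i "").toList.length))) (fun x => x)).getD 0)).length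
      = fields.length := by
    simp [PySem.List.length_pyRange_one]
  rw [PySem.List.pyGetD_ofNat', List.getD_cons_zero,
      render_eq _ _ (by omega),
      PySem.List.slice_from _ (by norm_num)]
  simp only [Int.toNat_one, List.drop_one, List.tail_cons]
  rw [body_eq _ _ ?hrows]
  case hrows =>
    intro r hr
    simp only [List.mem_map] at hr
    obtain ⟨row, _, rfl⟩ := hr
    simp [cellsOf]

  rfl

-- ===== VERDICT (by name: the statement is the Claim_ definition above) =====
theorem generate_ascii_table_spec : Claim_equal_generate_ascii_table := by
  intro rows fields _
  exact main_eq rows fields
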